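-- pv_equiv track=rewrite | github.com/ANasypana/ITEA_Python_Basics1 | lesson_3_2/mydoc/dic_functions.py | select_by_phone
-- ===== SOURCE A (Python) =====
-- def select_by_phone(d, phone_number):
--     temporary_d = {}
--     for key in d.keys():
--         temporary_value = d[key]
--         temporary_value = str(temporary_value)
--         if temporary_value[0] == '+':
--             temporary_value = temporary_value[1:]
--         temporary_value = temporary_value.replace(' ', '')
--         temporary_d[key] = temporary_value
--
--     phone_number = str(phone_number)
--     if phone_number[0] == '+':
--         phone_number = phone_number[1:]
--     phone_number = phone_number.replace(' ', '')
--
--     if phone_number in temporary_d.values():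
--         list_of_subscribers = []
--         for key, value in temporary_d.items():
--             if value == phone_number:
--                 name = key
--                 list_of_subscribers.append(name)
--         for i in list_of_subscribers:
--             return f'{i} has the number - {d[i]}'
--     else:
--         return 'This number does not exist'
-- ===== SOURCE B (Python) =====
-- def select_by_phone(d, phone_number):
--     def normalize(s):
--         s = str(s)
--         if s[0] == '+':
--             s = s[1:]
--         return s.replace(' ', '')
--
--     target = normalize(phone_number)
--     for key, value in d.items():
--         if normalize(value) == target:
--             return f'{key} has the number - {value}'
--     return 'This number does not exist'
-- ===== Notes on version B (the rewrite author's own statement) =====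
-- stated objective: simpler
-- what changed: B replaces A's precomputed normalized dict, membership test and collect-all-matches loop with one pass that returns on the first matching entry; Pre_ excludes inputs with an empty phone number or an empty dict value, on which A raises IndexError.
import Mathlib
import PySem

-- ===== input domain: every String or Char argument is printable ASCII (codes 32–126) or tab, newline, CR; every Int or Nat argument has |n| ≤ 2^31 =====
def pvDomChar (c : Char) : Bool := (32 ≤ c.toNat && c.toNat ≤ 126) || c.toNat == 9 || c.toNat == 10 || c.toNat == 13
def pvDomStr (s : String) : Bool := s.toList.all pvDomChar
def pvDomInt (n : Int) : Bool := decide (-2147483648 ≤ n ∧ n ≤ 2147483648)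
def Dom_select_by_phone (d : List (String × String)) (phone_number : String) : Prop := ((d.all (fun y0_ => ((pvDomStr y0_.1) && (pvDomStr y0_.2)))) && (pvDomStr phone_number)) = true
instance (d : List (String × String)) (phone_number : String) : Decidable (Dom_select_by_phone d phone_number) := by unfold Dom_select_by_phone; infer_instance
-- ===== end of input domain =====

-- B replaces A's three passes (normalized dict, membership test, collect-all-matches) with one
-- pass returning on the first matching entry; same return value on Pre_, no speed claim.

-- shared normalization snippet both Pythons contain: drop a leading '+', remove spaces
-- (the s[0] IndexError on the empty string is excluded by Pre_; here pyGet? "" 0 = none ≠ some '+')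
def pvNormalize (s : String) : String :=
  let s1 := if PySem.Str.pyGet? s 0 = some '+' then PySem.Str.slice s (some 1) none else s
  PySem.Str.replace s1 " " ""

-- ===== PORT A =====
def select_by_phone (d : List (String × String)) (phone_number : String) : String :=
  let dd := PySem.Dict.ofList d
  let temporary_d :=
    dd.keys.foldl (fun t key => t.insert key (pvNormalize (dd.getD key ""))) PySem.Dict.empty
  let p := pvNormalize phone_number
  if temporary_d.values.contains p then
    let list_of_subscribers :=
      temporary_d.items.foldl (fun acc kv => if kv.2 = p then acc ++ [kv.1] else acc) []
    match list_of_subscribers with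
    | [] => ""  -- Python falls off the loop and returns None; unreachable (membership held)
    | i :: _ => i ++ " has the number - " ++ dd.getD i ""
  else
    "This number does not exist"

-- ===== PORT B =====
-- B's loop with early return: structural recursion returning the first matching (key, value)
def pvFindMatch (target : String) : List (String × String) → Option (String × String)
  | [] => none
  | kv :: t => if pvNormalize kv.2 = target then some kv else pvFindMatch target t

def select_by_phone_alt (d : List (String × String)) (phone_number : String) : String :=
  let dd := PySem.Dict.ofList d
  let target := pvNormalize phone_number
  match pvFindMatch target dd.items with
  | some kv => kv.1 ++ " has the number - " ++ kv.2
  | none => "This number does not exist"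

-- ===== PRECONDITION & SPEC =====
-- Pre_ excludes exactly the inputs where Python A raises IndexError: an empty phone_number or an
-- empty value of the dict built from d (a value shadowed by a duplicate key is never read).
def Pre_select_by_phone (d : List (String × String)) (phone_number : String) : Prop :=
  phone_number.toList ≠ [] ∧ ∀ v ∈ (PySem.Dict.ofList d).values, v.toList ≠ []
instance (d : List (String × String)) (phone_number : String) : Decidable (Pre_select_by_phone d phone_number) := by unfold Pre_select_by_phone; infer_instance

def pvWitness_select_by_phone : (List (String × String)) × String :=
  ([("alice", "+1 23"), ("bob", "45")], "1 2 3")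

def Spec_select_by_phone (d : List (String × String)) (phone_number : String) (out : String) : Prop := out = select_by_phone_alt d phone_number
instance (d : List (String × String)) (phone_number : String) (out : String) : Decidable (Spec_select_by_phone d phone_number out) := by unfold Spec_select_by_phone; infer_instance

-- ===== CLAIM (what is proved, stated in full; the proofs are below) =====
def Claim_equal_select_by_phone : Prop := ∀ (d : List (String × String)) (phone_number : String), Dom_select_by_phone d phone_number → Pre_select_by_phone d phone_number → Spec_select_by_phone d phone_number (select_by_phone d phone_number)

-- ===== LEMMAS AND PROOFS =====

-- B's first-match recursion is List.find?
theorem pvFindMatch_eq_find? (p : String) (l : List (String × String)) :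
    pvFindMatch p l = l.find? (fun kv => pvNormalize kv.2 == p) := by
  induction l with
  | nil => rfl
  | cons kv t ih =>
    simp only [pvFindMatch, List.find?_cons]
    by_cases hm : pvNormalize kv.2 = p
    · simp [hm]
    · rw [show (pvNormalize kv.2 == p) = false from beq_eq_false_iff_ne.mpr hm]
      simpa [hm] using ih

-- the combined body equality, over an arbitrary items list
theorem pv_body (l : List (String × String)) (p : String) (out : String → String) :
    (if (l.map (fun kv => pvNormalize kv.2)).contains p then
      match (l.filter (fun kv => pvNormalize kv.2 == p)).map (·.1) with
      | [] => ""
      | i :: _ => out i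
    else "This number does not exist")
    = (match (l.find? (fun kv => pvNormalize kv.2 == p)).map (·.1) with
      | none => "This number does not exist"
      | some key => out key) := by
  induction l with
  | nil => rfl
  | cons kv t ih =>
    simp only [List.map_cons, List.contains_cons, List.filter_cons, List.find?_cons]
    by_cases hm : pvNormalize kv.2 = p
    · simp only [show (pvNormalize kv.2 == p) = true by simp [hm],
        show (p == pvNormalize kv.2) = true by simp [hm], Bool.true_or, if_true]
      simp
    · simp only [show (pvNormalize kv.2 == p) = false from beq_eq_false_iff_ne.mpr hm,
        show (p == pvNormalize kv.2) = false from beq_eq_false_iff_ne.mpr (Ne.symm hm),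
        Bool.false_or]
      exact ih

theorem select_by_phone_eq (d : List (String × String)) (phone_number : String) :
    select_by_phone d phone_number = select_by_phone_alt d phone_number := by
  unfold select_by_phone select_by_phone_alt
  set dd := PySem.Dict.ofList d with hdd
  have hnd : dd.keys.Nodup := PySem.Dict.nodup_keys_ofList d
  -- A's first loop inserts fresh distinct keys, so its items list is a map over dd.keys
  have hfresh : ∀ a ∈ dd.keys, (PySem.Dict.empty : PySem.Dict String String).contains a = false := by
    intro a _; simp [PySem.Dict.contains_empty]
  have htmp : (dd.keys.foldl (fun t key => t.insert key (pvNormalize (dd.getD key ""))) PySem.Dict.empty).items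
      = dd.keys.map (fun k => (k, pvNormalize (dd.getD k ""))) := by
    simpa using PySem.Dict.items_foldl_insert_fresh (l := dd.keys) (k := fun a => a)
      (v := fun a => pvNormalize (dd.getD a "")) (d := PySem.Dict.empty) hfresh (by simpa using hnd)
  have hitems : dd.items = dd.keys.map (fun k => (k, dd.getD k "")) :=
    PySem.Dict.items_eq_map_keys dd hnd ""
  have htmp' : (dd.keys.foldl (fun t key => t.insert key (pvNormalize (dd.getD key ""))) PySem.Dict.empty).items
      = dd.items.map (fun kv => (kv.1, pvNormalize kv.2)) := by
    rw [htmp, hitems, List.map_map]; rfl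
  -- every pair of dd.items carries its own looked-up value
  have hget : ∀ kv ∈ dd.items, kv.2 = dd.getD kv.1 "" := by
    rw [hitems]; intro kv hkv
    obtain ⟨k, _, rfl⟩ := List.mem_map.mp hkv
    rfl
  simp only [PySem.Dict.values] at *
  rw [pvFindMatch_eq_find?]
  rw [htmp']
  have hval : (dd.items.map (fun kv => (kv.1, pvNormalize kv.2))).map (·.2)
      = dd.items.map (fun kv => pvNormalize kv.2) := by
    rw [List.map_map]; rfl
  have hfil : ∀ (l : List (String × String)) (p : String),
      (l.map (fun kv => (kv.1, pvNormalize kv.2))).foldl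
        (fun acc kv => if kv.2 = p then acc ++ [kv.1] else acc) ([] : List String)
      = (l.filter (fun kv => pvNormalize kv.2 == p)).map (·.1) := by
    intro l p
    have hgen : ∀ (l : List (String × String)) (acc : List String),
        (l.map (fun kv => (kv.1, pvNormalize kv.2))).foldl
          (fun acc kv => if kv.2 = p then acc ++ [kv.1] else acc) acc
        = acc ++ (l.filter (fun kv => pvNormalize kv.2 == p)).map (·.1) := by
      intro l; induction l with
      | nil => intro acc; simp
      | cons kv t ih =>
        intro acc
        by_cases hm : pvNormalize kv.2 = p
        · simp [hm, ih]
        · simp [hm, ih]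
    simpa using hgen l []
  rw [hval, hfil]
  rw [pv_body dd.items (pvNormalize phone_number)
    (fun i => i ++ " has the number - " ++ dd.getD i "")]
  -- align the found pair's value with A's lookup
  cases hf : dd.items.find? (fun kv => pvNormalize kv.2 == pvNormalize phone_number) with
  | none => simp
  | some kv =>
    have hmem : kv ∈ dd.items := List.mem_of_find?_eq_some hf
    simp [hget kv hmem]

-- ===== VERDICT (by name: the statement is the Claim_ definition above) =====
theorem select_by_phone_spec : Claim_equal_select_by_phone := by
  intro d phone_number _ _
  unfold Spec_select_by_phone
  exact select_by_phone_eq d phone_number
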